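-- pv_equiv track=rewrite | github.com/Suhruth9/Spoken_to_Written | spoken2written/processing_text.py | punct_inplace
-- ===== SOURCE A (Python) =====
-- import string
--
-- def rem_elems(text_list, r):
--     for i in range(len(r)):
--         text_list.pop(r[i] - i)
--
--     return (text_list)
--
-- def punct_inplace(text_list):
--
--     r = []
--     for i in range(1, len(text_list)):
--         p = text_list[i]
--         if len(p) == 1:
--             if p in string.punctuation:
--                 text_list[i-1] = text_list[i-1] + p
--                 r.append(i)
--
--     text_list = rem_elems(text_list, r)
--
--     return (text_list)
-- ===== SOURCE B (Python) =====
-- import string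
--
-- def punct_inplace(text_list):
--     out = []
--     last = len(text_list) - 1
--     for j, tok in enumerate(text_list):
--         if j > 0 and len(tok) == 1 and tok in string.punctuation:
--             continue
--         if j < last:
--             nxt = text_list[j + 1]
--             if len(nxt) == 1 and nxt in string.punctuation:
--                 tok = tok + nxt
--         out.append(tok)
--     text_list[:] = out
--     return text_list
-- ===== Notes on version B (the rewrite author's own statement) =====
-- stated objective: simpler
-- what changed: A mutates the list via an index loop, records the positions of attached punctuation tokens in a table r, and then removes them with a second loop of shifted pops; B is a single forward pass with look-ahead that builds the result list directly (skip a punctuation token past index 0, otherwise emit the token with the next original token attached if it is punctuation) and writes it back in place.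
import Mathlib
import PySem

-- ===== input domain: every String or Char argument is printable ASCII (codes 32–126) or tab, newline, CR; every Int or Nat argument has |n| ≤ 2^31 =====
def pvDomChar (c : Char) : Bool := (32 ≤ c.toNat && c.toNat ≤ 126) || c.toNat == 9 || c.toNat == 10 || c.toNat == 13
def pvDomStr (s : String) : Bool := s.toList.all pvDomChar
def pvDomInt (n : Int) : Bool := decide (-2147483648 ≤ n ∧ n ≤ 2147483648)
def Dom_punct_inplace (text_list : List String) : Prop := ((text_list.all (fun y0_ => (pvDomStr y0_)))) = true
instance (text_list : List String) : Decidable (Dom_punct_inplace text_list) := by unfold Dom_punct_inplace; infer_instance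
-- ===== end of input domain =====

-- B replaces A's mutate-then-remove two-phase index loops by one forward pass with look-ahead (simpler);
-- both Pythons mutate the argument list in place to the same final content that they return.

-- ===== PORT A =====
-- string.punctuation
def pyPunctuation : String := "!\"#$%&'()*+,-./:;<=>?@[\\]^_`{|}~"

-- the test `len(p) == 1 and p in string.punctuation` (identical in A and B)
def isPunctTok (p : String) : Bool := PySem.Str.len p == 1 && PySem.Str.isIn p pyPunctuation

def rem_elems (text_list : List String) (r : List Int) : List String :=
  (PySem.List.pyRange 0 (r.length : Int) 1).foldl
    (fun xs i =>
      match PySem.List.pop? xs (PySem.List.pyGetD r i 0 - i) with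
      | some res => res.2
      | none => xs) text_list

def punct_inplace (text_list : List String) : List String :=
  let st := (PySem.List.pyRange 1 (text_list.length : Int) 1).foldl
    (fun (st : List String × List Int) i =>
      let p := PySem.List.pyGetD st.1 i ""
      if isPunctTok p then
        (PySem.List.pySetD st.1 (i - 1) (PySem.List.pyGetD st.1 (i - 1) "" ++ p), st.2 ++ [i])
      else st) (text_list, [])
  rem_elems st.1 st.2

-- ===== PORT B =====
def punct_inplace_alt (text_list : List String) : List String :=
  let last : Int := (text_list.length : Int) - 1
  (PySem.List.enumerate text_list 0).foldl
    (fun out jt =>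
      if decide (0 < jt.1) && isPunctTok jt.2 then out
      else
        let tok :=
          if jt.1 < last then
            let nxt := PySem.List.pyGetD text_list (jt.1 + 1) ""
            if isPunctTok nxt then jt.2 ++ nxt else jt.2
          else jt.2
        out ++ [tok]) []

-- ===== PRECONDITION & SPEC =====
def Spec_punct_inplace (text_list : List String) (out : List String) : Prop := out = punct_inplace_alt text_list
instance (text_list : List String) (out : List String) : Decidable (Spec_punct_inplace text_list out) := by unfold Spec_punct_inplace; infer_instance

-- ===== CLAIM (what is proved, stated in full; the proofs are below) =====
def Claim_equal_punct_inplace : Prop := ∀ (text_list : List String), Dom_punct_inplace text_list → Spec_punct_inplace text_list (punct_inplace text_list)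

-- ===== LEMMAS AND PROOFS =====

-- `tok + nxt if nxt is single-char punctuation else tok`, for a token and its original successor
def mrg (t nx : String) : String := if isPunctTok nx then t ++ nx else t

-- common middle form of both programs: after the head, tokens are kept iff not punctuation,
-- and every kept token is merged with its original successor
def gRest : List String → List String
  | [] => []
  | y :: ys => if isPunctTok y then gRest ys else mrg y (ys.headD "") :: gRest ys

def fAll : List String → List String
  | [] => []
  | x :: rest => mrg x (rest.headD "") :: gRest rest

-- every token merged with its original successor (A's list after the first loop)
def mrgL : List String → List String
  | [] => []
  | x :: rest => mrg x (rest.headD "") :: mrgL rest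

-- which positions A's first loop records in r: false at 0, then the punctuation test
def maskOf : List String → List Bool
  | [] => []
  | _ :: rest => false :: rest.map isPunctTok

-- positions (as Python ints) of the true entries of a mask
def idxTrue : List Bool → List Int
  | [] => []
  | b :: bs => (if b then [(0 : Int)] else []) ++ (idxTrue bs).map (· + 1)

-- one `text_list.pop(i)` step, total form exactly as in the port of rem_elems
def popstep (xs : List String) (i : Int) : List String :=
  match PySem.List.pop? xs i with
  | some res => res.2
  | none => xs

-- rem_elems with the running counter already subtracted from each remaining index
def remGo (xs : List String) : List Int → List String
  | [] => xs
  | a :: as => remGo (popstep xs a) (as.map (· - 1))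
  termination_by l => l.length
  decreasing_by simp

-- keep the entries of xs whose mask entry is false
def maskKeep : List String → List Bool → List String
  | [], _ => []
  | xs, [] => xs
  | x :: xs, b :: bs => if b then maskKeep xs bs else x :: maskKeep xs bs

lemma isPunctTok_empty : isPunctTok "" = false := by decide

lemma length_mrgL (xs : List String) : (mrgL xs).length = xs.length := by
  induction xs with
  | nil => rfl
  | cons x rest ih => simp [mrgL, ih]

lemma mrgL_getD (xs : List String) (j : Nat) (h : j < xs.length) :
    (mrgL xs).getD j "" = mrg (xs.getD j "") (xs.getD (j + 1) "") := by
  induction xs generalizing j with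
  | nil => simp at h
  | cons x rest ih =>
    cases j with
    | zero =>
      cases rest with
      | nil => simp [mrgL]
      | cons y ys => simp [mrgL]
    | succ j =>
      simp only [mrgL, List.getD_cons_succ]
      exact ih j (by simpa using h)

lemma length_maskOf (xs : List String) : (maskOf xs).length = xs.length := by
  cases xs with
  | nil => rfl
  | cons x rest => simp [maskOf]

lemma maskOf_getD (xs : List String) (j : Nat) (h1 : 1 ≤ j) (h2 : j < xs.length) :
    (maskOf xs).getD j false = isPunctTok (xs.getD j "") := by
  cases xs with
  | nil => simp at h2
  | cons x rest =>
    obtain ⟨m, rfl⟩ : ∃ m, j = m + 1 := ⟨j - 1, by omega⟩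
    have hm : m < rest.length := by simpa using h2
    rw [maskOf, List.getD_cons_succ, List.getD_cons_succ, List.getD_eq_getElem?_getD,
      List.getElem?_map, List.getElem?_eq_getElem hm, List.getD_eq_getElem?_getD,
      List.getElem?_eq_getElem hm]
    rfl

-- ===== idxTrue lemmas =====

lemma idxTrue_nonneg (bs : List Bool) : ∀ x ∈ idxTrue bs, 0 ≤ x := by
  induction bs with
  | nil => simp [idxTrue]
  | cons b bs ih =>
    intro x hx
    simp only [idxTrue, List.mem_append, List.mem_map] at hx
    rcases hx with hx | ⟨y, hy, rfl⟩
    · split at hx <;> simp_all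
    · have := ih y hy; omega

lemma idxTrue_pairwise (bs : List Bool) : (idxTrue bs).Pairwise (· < ·) := by
  induction bs with
  | nil => simp [idxTrue]
  | cons b bs ih =>
    simp only [idxTrue]
    rw [List.pairwise_append]
    refine ⟨by split <;> simp, ih.map _ (by intro a b h; omega), ?_⟩
    intro a ha c hc
    simp only [List.mem_map] at hc
    obtain ⟨y, hy, rfl⟩ := hc
    have := idxTrue_nonneg bs y hy
    split at ha <;> simp_all

lemma idxTrue_append_singleton (bs : List Bool) (b : Bool) :
    idxTrue (bs ++ [b]) = idxTrue bs ++ (if b then [(bs.length : Int)] else []) := by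
  induction bs with
  | nil => cases b <;> simp [idxTrue]
  | cons c cs ih =>
    simp only [List.cons_append, idxTrue, ih, List.map_append]
    cases b <;> cases c <;> simp

-- ===== pop / remGo lemmas =====

lemma pop?_oob (ys : List String) (i : Int) (h : (ys.length : Int) ≤ i) :
    PySem.List.pop? ys i = none := by
  simp [PySem.List.pop?, PySem.List.pyIdx?]
  intro a ha
  split at ha
  · split at ha <;> simp_all; omega
  · split at ha <;> simp_all; omega

lemma popstep_nil (i : Int) : popstep [] i = [] := by
  unfold popstep PySem.List.pop?
  cases h : PySem.List.pyIdx? ([] : List String).length i <;> simp [h]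

lemma popstep_cons_succ (y : String) (ys : List String) (i : Int) (h : 1 ≤ i) :
    popstep (y :: ys) i = y :: popstep ys (i - 1) := by
  obtain ⟨m, rfl⟩ : ∃ m : Nat, i = ((m + 1 : Nat) : Int) := ⟨(i - 1).toNat, by omega⟩
  have hsub : ((m + 1 : Nat) : Int) - 1 = (m : Int) := by push_cast; ring
  rw [hsub]
  by_cases hr : m < ys.length
  · rw [popstep, PySem.List.pop?_natCast _ _ (by simpa using Nat.succ_lt_succ hr)]
    rw [popstep, PySem.List.pop?_natCast _ _ hr]
    simp
  · rw [popstep, pop?_oob _ _ (by simp; omega)]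
    rw [popstep, pop?_oob _ _ (by simp; omega)]

lemma remGo_nil (t : List Int) : remGo [] t = [] := by
  induction h : t.length generalizing t with
  | zero => cases t with
    | nil => simp [remGo]
    | cons a as => simp at h
  | succ n ih =>
    cases t with
    | nil => simp [remGo]
    | cons a as =>
      rw [remGo, popstep_nil]
      exact ih _ (by simpa using by simpa using h)

lemma remGo_cons_pos (y : String) (ys : List String) (t : List Int)
    (h1 : ∀ x ∈ t, 1 ≤ x) (h2 : t.Pairwise (· < ·)) :
    remGo (y :: ys) t = y :: remGo ys (t.map (· - 1)) := by
  induction h : t.length generalizing t ys with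
  | zero =>
    cases t with
    | nil => simp [remGo]
    | cons a as => simp at h
  | succ n ih =>
    cases t with
    | nil => simp at h
    | cons a as =>
      rw [remGo, popstep_cons_succ _ _ _ (h1 a (by simp))]
      rw [List.map_cons, remGo]
      refine Eq.trans (ih (popstep ys (a - 1)) (as.map (· - 1)) ?g1 ?g2 ?g3) ?g4
      case g1 =>
        intro x hx; simp only [List.mem_map] at hx; obtain ⟨z, hz, rfl⟩ := hx
        have hz1 := h1 z (List.mem_cons_of_mem _ hz)
        have hz2 : a < z := List.rel_of_pairwise_cons h2 hz
        have ha : 1 ≤ a := h1 a List.mem_cons_self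
        omega
      case g2 => refine (List.pairwise_cons.mp h2).2.map ?_ ?_; intro p q hpq; omega
      case g3 => simpa using Nat.succ_injective h
      case g4 => rw [List.map_map]

lemma map_shift_unshift (t : List Int) : (t.map (· + 1)).map (· - 1) = t := by
  rw [List.map_map]
  calc t.map ((fun x => x - 1) ∘ fun x => x + 1) = t.map id := List.map_congr_left (by intro a _; simp)
  _ = t := List.map_id t

lemma remGo_mask (ys : List String) (bs : List Bool) :
    remGo ys (idxTrue bs) = maskKeep ys bs := by
  induction ys generalizing bs with
  | nil => rw [remGo_nil]; rfl
  | cons y ys ih =>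
    cases bs with
    | nil => simp [idxTrue, remGo, maskKeep]
    | cons b bs =>
      cases b with
      | true =>
        have e : idxTrue (true :: bs) = 0 :: (idxTrue bs).map (· + 1) := by simp [idxTrue]
        rw [e, remGo]
        have : popstep (y :: ys) 0 = ys := by
          rw [popstep, PySem.List.pop?_zero_cons]
        rw [this, map_shift_unshift, ih, maskKeep]
        simp
      | false =>
        have e : idxTrue (false :: bs) = (idxTrue bs).map (· + 1) := by simp [idxTrue]
        rw [e, remGo_cons_pos _ _ _
          (by intro x hx; simp only [List.mem_map] at hx; obtain ⟨z, hz, rfl⟩ := hx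
              have := idxTrue_nonneg bs z hz; omega)
          ((idxTrue_pairwise bs).map _ (by intro p q h; omega))]
        rw [map_shift_unshift, ih, maskKeep]
        simp

-- ===== rem_elems = remGo =====

lemma map_sub_fuse (t : List Int) (k : Int) :
    (t.map (· - k)).map (· - 1) = t.map (· - (k + 1)) := by
  rw [List.map_map]
  exact List.map_congr_left (by intro a _; simp; ring)

lemma rem_loop (r : List Int) : ∀ (s : List Int) (k : Nat) (ys : List String), s = r.drop k →
    ((List.range' k (r.length - k)).map (Nat.cast : Nat → Int)).foldl
      (fun xs i => popstep xs (PySem.List.pyGetD r i 0 - i)) ys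
    = remGo ys (s.map (· - (k : Int))) := by
  intro s
  induction s with
  | nil =>
    intro k ys h
    have : r.length - k = 0 := by
      have := congrArg List.length h; simp at this; omega
    simp [this]
    rw [remGo]
  | cons a as ih =>
    intro k ys h
    have hlen : k < r.length := by
      have := congrArg List.length h; simp at this; omega
    have hk : r.length - k = (r.length - (k + 1)) + 1 := by omega
    rw [hk]
    simp only [List.range'_succ, List.map_cons, List.foldl_cons]
    have hget : PySem.List.pyGetD r (k : Int) 0 = a := by
      rw [PySem.List.pyGetD_natCast]
      have : r[k]? = some a := by
        have : (r.drop k).head? = some a := by rw [← h]; rfl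
        rwa [List.head?_drop] at this
      simp [List.getD_eq_getElem?_getD, this]
    rw [hget]
    have htail : as = r.drop (k + 1) := by
      have : (r.drop k).tail = r.drop (k + 1) := by rw [List.tail_drop]
      rw [← this, ← h]; rfl
    rw [ih (k + 1) (popstep ys (a - k)) htail]
    conv_rhs => rw [remGo]
    rw [map_sub_fuse]
    push_cast
    ring_nf

lemma rem_eq_remGo (ys : List String) (r : List Int) : rem_elems ys r = remGo ys r := by
  have h := rem_loop r r 0 ys (by simp)
  simp only [Nat.sub_zero, ← List.range_eq_range'] at h
  have e2 : r.map (fun x => x - ((0 : Nat) : Int)) = r := by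
    calc r.map (fun x => x - ((0 : Nat) : Int)) = r.map id := List.map_congr_left (by intro a _; simp)
    _ = r := List.map_id r
  rw [e2] at h
  unfold rem_elems
  rw [PySem.List.pyRange_one]
  have e3 : (((r.length : Int)) - 0).toNat = r.length := by omega
  rw [e3]
  have e4 : (List.range r.length).map (fun k => (0 : Int) + ↑k) = (List.range r.length).map (Nat.cast : Nat → Int) :=
    List.map_congr_left (by intro a _; simp)
  rw [e4]
  exact h

-- ===== A's first loop invariant =====

lemma state_getD (xs : List String) (k j : Nat) (hkj : k ≤ j) (hk : k ≤ xs.length) :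
    ((mrgL xs).take k ++ xs.drop k).getD j "" = xs.getD j "" := by
  have hl : ((mrgL xs).take k).length = k := by
    rw [List.length_take, length_mrgL]; omega
  rw [List.getD_eq_getElem?_getD, List.getElem?_append_right (by omega), hl,
    List.getElem?_drop]
  rw [List.getD_eq_getElem?_getD]
  have e : k + (j - k) = j := by omega
  rw [e]

lemma loop_inv (xs : List String) (k : Nat) (hk : k + 1 ≤ xs.length) :
    ((List.range k).map (fun t => ((1 + t : Nat) : Int))).foldl
      (fun (st : List String × List Int) i =>
        let p := PySem.List.pyGetD st.1 i ""
        if isPunctTok p then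
          (PySem.List.pySetD st.1 (i - 1) (PySem.List.pyGetD st.1 (i - 1) "" ++ p), st.2 ++ [i])
        else st) (xs, [])
    = ((mrgL xs).take k ++ xs.drop k, idxTrue ((maskOf xs).take (k + 1))) := by
  induction k with
  | zero =>
    simp only [List.range_zero, List.map_nil, List.foldl_nil, List.take_zero, List.nil_append,
      List.drop_zero]
    cases xs with
    | nil => simp at hk
    | cons x rest => simp [maskOf, idxTrue]
  | succ k ih =>
    rw [List.range_succ, List.map_append, List.foldl_append, ih (by omega)]
    simp only [List.map_cons, List.map_nil, List.foldl_cons, List.foldl_nil]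
    have hk1 : 1 + k < xs.length := by omega
    have hcast : ((1 + k : Nat) : Int) - 1 = ((k : Nat) : Int) := by push_cast; ring
    have hp : PySem.List.pyGetD ((mrgL xs).take k ++ xs.drop k) ((1 + k : Nat) : Int) ""
        = xs.getD (1 + k) "" := by
      rw [PySem.List.pyGetD_natCast]
      exact state_getD xs k (1 + k) (by omega) (by omega)
    have hmask : (maskOf xs).getD (k + 1) false = isPunctTok (xs.getD (1 + k) "") := by
      rw [maskOf_getD xs (k + 1) (by omega) (by rw [Nat.add_comm] at hk1; omega)]
      congr 1
      rw [Nat.add_comm]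
    have htake : (maskOf xs).take (k + 1 + 1)
        = (maskOf xs).take (k + 1) ++ [(maskOf xs).getD (k + 1) false] := by
      rw [List.take_succ]
      congr 1
      have : (maskOf xs).length = xs.length := length_maskOf xs
      rw [List.getD_eq_getElem?_getD, List.getElem?_eq_getElem (by omega)]
      rfl
    have hlentake : ((maskOf xs).take (k + 1)).length = k + 1 := by
      rw [List.length_take, length_maskOf]; omega
    have hMk : (mrgL xs).getD k "" = mrg (xs.getD k "") (xs.getD (k + 1) "") :=
      mrgL_getD xs k (by omega)
    have hdropk : xs.drop k = xs.getD k "" :: xs.drop (k + 1) := by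
      rw [List.drop_eq_getElem_cons (by omega : k < xs.length)]
      congr 1
      rw [List.getD_eq_getElem?_getD, List.getElem?_eq_getElem (by omega : k < xs.length)]
      rfl
    have htakeM : (mrgL xs).take (k + 1) = (mrgL xs).take k ++ [(mrgL xs).getD k ""] := by
      rw [List.take_succ]
      congr 1
      rw [List.getD_eq_getElem?_getD, List.getElem?_eq_getElem (by rw [length_mrgL]; omega)]
      rfl
    rw [hp]
    by_cases hP : isPunctTok (xs.getD (1 + k) "") = true
    · rw [if_pos hP]
      refine Prod.ext ?_ ?_
      · simp only
        rw [hcast, PySem.List.pySetD_natCast, PySem.List.pyGetD_natCast,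
          state_getD xs k k (by omega) (by omega)]
        rw [hdropk, htakeM, hMk]
        rw [List.set_append]
        rw [if_neg (by rw [List.length_take, length_mrgL]; omega)]
        have : k - ((mrgL xs).take k).length = 0 := by rw [List.length_take, length_mrgL]; omega
        rw [this, List.set_cons_zero, List.append_assoc]
        simp only [List.cons_append, List.nil_append]
        congr 2
        rw [mrg, if_pos (by rw [Nat.add_comm] at hP; exact hP)]
        congr 1
        rw [Nat.add_comm]
      · simp only
        rw [htake, idxTrue_append_singleton, hmask, if_pos hP, hlentake]
        congr 2
        push_cast
        ring
    · rw [if_neg hP]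
      refine Prod.ext ?_ ?_
      · simp only
        rw [htakeM, hMk, hdropk]
        rw [mrg, if_neg (by rw [Nat.add_comm 1 k] at hP; simpa using hP)]
        rw [List.append_assoc]
        rfl
      · simp only
        rw [htake, idxTrue_append_singleton, hmask, if_neg hP]
        simp

-- ===== B = fAll =====

-- the loop body of punct_inplace_alt, with `last` inlined (definitionally equal)
def bstep (xs : List String) (out : List String) (jt : Int × String) : List String :=
  if decide (0 < jt.1) && isPunctTok jt.2 then out
  else
    let tok :=
      if jt.1 < (xs.length : Int) - 1 then
        let nxt := PySem.List.pyGetD xs (jt.1 + 1) ""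
        if isPunctTok nxt then jt.2 ++ nxt else jt.2
      else jt.2
    out ++ [tok]

lemma nxt_getD (xs : List String) (k : Nat) (ts : List String) (h : xs.drop (k + 1) = ts) :
    PySem.List.pyGetD xs ((k : Int) + 1) "" = ts.headD "" := by
  have hcast : ((k : Int) + 1) = ((k + 1 : Nat) : Int) := by push_cast; ring
  rw [hcast, PySem.List.pyGetD_natCast, List.getD_eq_getElem?_getD]
  have : xs[k + 1]? = ts[0]? := by
    rw [← h, List.getElem?_drop]
  rw [this]
  cases ts <;> simp

lemma alt_loop (xs : List String) : ∀ (ys : List String) (k : Nat) (acc : List String),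
    1 ≤ k → ys = xs.drop k →
    (PySem.List.enumerate ys (k : Int)).foldl (bstep xs) acc = acc ++ gRest ys := by
  intro ys
  induction ys with
  | nil => intro k acc _ _; simp [PySem.List.enumerate_nil, gRest]
  | cons y ts ih =>
    intro k acc hk h
    have hts : xs.drop (k + 1) = ts := by
      rw [← List.tail_drop, ← h]; rfl
    have hlen : xs.length = k + ts.length + 1 := by
      have := congrArg List.length h
      simp only [List.length_drop] at this
      have hk2 : k ≤ xs.length := by
        by_contra hc
        rw [List.drop_of_length_le (by omega)] at h
        simp at h
      simp at this
      omega
    rw [PySem.List.enumerate_cons, List.foldl_cons]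
    have hcast : (k : Int) + 1 = ((k + 1 : Nat) : Int) := by push_cast; ring
    by_cases hy : isPunctTok y = true
    · have hcond : (decide ((0 : Int) < (k : Int)) && isPunctTok y) = true := by
        simp [hy]; omega
      rw [bstep, if_pos hcond, hcast, ih (k + 1) acc (by omega) hts.symm]
      rw [gRest, if_pos hy]
    · have hcond : (decide ((0 : Int) < (k : Int)) && isPunctTok y) = false := by
        simp [hy]
      rw [bstep, if_neg (by rw [hcond]; simp)]
      simp only
      have htok : (if (k : Int) < (xs.length : Int) - 1 then
          if isPunctTok (PySem.List.pyGetD xs ((k : Int) + 1) "") = true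
          then y ++ PySem.List.pyGetD xs ((k : Int) + 1) "" else y
        else y) = mrg y (ts.headD "") := by
        cases ts with
        | nil =>
          simp only [List.length_nil] at hlen
          rw [if_neg (by omega)]
          simp [mrg, isPunctTok_empty]
        | cons t0 ts' =>
          simp only [List.length_cons] at hlen
          rw [if_pos (by omega), nxt_getD xs k (t0 :: ts') hts, mrg]
      rw [htok, hcast, ih (k + 1) (acc ++ [mrg y (ts.headD "")]) (by omega) hts.symm]
      rw [gRest, if_neg (by simp [hy]), List.append_assoc]
      rfl

lemma alt_eq_fAll (xs : List String) : punct_inplace_alt xs = fAll xs := by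
  have hrfl : punct_inplace_alt xs = (PySem.List.enumerate xs 0).foldl (bstep xs) [] := rfl
  rw [hrfl]
  cases xs with
  | nil => rfl
  | cons x rest =>
    rw [PySem.List.enumerate_cons, List.foldl_cons]
    have hcond : (decide ((0 : Int) < (0 : Int)) && isPunctTok x) = false := by simp
    rw [bstep, if_neg (by rw [hcond]; simp)]
    simp only
    have htok : (if (0 : Int) < ((x :: rest).length : Int) - 1 then
        if isPunctTok (PySem.List.pyGetD (x :: rest) ((0 : Int) + 1) "") = true
        then x ++ PySem.List.pyGetD (x :: rest) ((0 : Int) + 1) "" else x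
      else x) = mrg x (rest.headD "") := by
      cases rest with
      | nil =>
        rw [if_neg (by simp)]
        simp [mrg, isPunctTok_empty]
      | cons r0 rs =>
        rw [if_pos (by simp), show ((0 : Int) + 1) = (((0 : Nat) : Int) + 1) by norm_num,
          nxt_getD (x :: r0 :: rs) 0 (r0 :: rs) rfl, mrg]
    rw [htok, show ((0 : Int) + 1) = ((1 : Nat) : Int) by norm_num,
      alt_loop (x :: rest) rest 1 ([] ++ [mrg x (rest.headD "")]) (by omega) rfl]
    simp [fAll]

-- ===== A = fAll =====

lemma maskKeep_gRest (rest : List String) :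
    maskKeep (mrgL rest) (rest.map isPunctTok) = gRest rest := by
  induction rest with
  | nil => rfl
  | cons y ys ih =>
    by_cases hy : isPunctTok y = true <;>
      simp [mrgL, maskKeep, gRest, hy, ih]

lemma getD_length (xs : List String) : xs.getD xs.length "" = "" := by
  rw [List.getD_eq_getElem?_getD, List.getElem?_eq_none (by omega)]
  rfl

lemma a_eq_fAll (xs : List String) : punct_inplace xs = fAll xs := by
  cases xs with
  | nil => rfl
  | cons x rest =>
    have hn : (x :: rest).length = rest.length + 1 := by simp
    unfold punct_inplace
    rw [PySem.List.pyRange_one]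
    have e1 : ((((x :: rest).length : Int)) - 1).toNat = rest.length := by
      rw [hn]; omega
    rw [e1]
    have e2 : (List.range rest.length).map (fun k => (1 : Int) + ↑k)
        = (List.range rest.length).map (fun t => ((1 + t : Nat) : Int)) :=
      List.map_congr_left (by intro a _; push_cast; ring)
    rw [e2, loop_inv (x :: rest) rest.length (by omega)]
    simp only
    have hmask : (maskOf (x :: rest)).take (rest.length + 1) = maskOf (x :: rest) :=
      List.take_of_length_le (by rw [length_maskOf, hn])
    have hMlen : (mrgL (x :: rest)).length = rest.length + 1 := by
      rw [length_mrgL, hn]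
    have hidx : rest.length < (mrgL (x :: rest)).length := by rw [hMlen]; omega
    have hlist : (mrgL (x :: rest)).take rest.length ++ (x :: rest).drop rest.length
        = mrgL (x :: rest) := by
      have hd : (x :: rest).drop rest.length = [(x :: rest).getD rest.length ""] := by
        rw [List.drop_eq_getElem_cons (by omega : rest.length < (x :: rest).length)]
        have hnil : (x :: rest).drop (rest.length + 1) = [] :=
          List.drop_of_length_le (by omega)
        rw [hnil]
        congr 1
        rw [List.getD_eq_getElem?_getD, List.getElem?_eq_getElem (by omega)]
        rfl
      have hM : (mrgL (x :: rest)).getD rest.length ""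
          = (x :: rest).getD rest.length "" := by
        rw [mrgL_getD (x :: rest) rest.length (by omega), ← hn, getD_length, mrg,
          isPunctTok_empty]
        simp
      have hopt : (mrgL (x :: rest))[rest.length]?.toList
          = [(x :: rest).getD rest.length ""] := by
        rw [List.getElem?_eq_getElem hidx]
        simp only [Option.toList_some]
        congr 1
        rw [← hM, List.getD_eq_getElem?_getD, List.getElem?_eq_getElem hidx]
        rfl
      conv_rhs => rw [← List.take_of_length_le (le_of_eq hMlen), List.take_succ, hopt]
      rw [hd]
    rw [hmask, hlist, rem_eq_remGo, remGo_mask]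
    simp only [mrgL, maskOf, maskKeep]
    rw [if_neg (by simp), maskKeep_gRest]
    rfl

-- ===== VERDICT (by name: the statement is the Claim_ definition above) =====
theorem punct_inplace_spec : Claim_equal_punct_inplace := by
  intro text_list _
  unfold Spec_punct_inplace
  rw [a_eq_fAll, alt_eq_fAll]
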